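-- pv_equiv track=rewrite | github.com/neozenith/sqlite-vector-graph | benchmarks/scripts/benchmark_graph.py | python_components
-- ===== SOURCE A (Python) =====
-- def python_components(adj):
--     """Connected components via Union-Find. Returns {node: component_id}."""
--     parent = {n: n for n in adj}
--     rank = dict.fromkeys(adj, 0)
--
--     def find(x):
--         while parent[x] != x:
--             parent[x] = parent[parent[x]]
--             x = parent[x]
--         return x
--
--     def union(x, y):
--         rx, ry = find(x), find(y)
--         if rx == ry:
--             return
--         if rank[rx] < rank[ry]:
--             rx, ry = ry, rx
--         parent[ry] = rx
--         if rank[rx] == rank[ry]: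
--             rank[rx] += 1
--
--     for node in adj:
--         for neighbor, _ in adj[node]:
--             union(node, neighbor)
--
--     # Normalize component IDs
--     component_map = {}
--     result = {}
--     for node in sorted(adj):
--         root = find(node)
--         if root not in component_map:
--             component_map[root] = len(component_map)
--         result[node] = component_map[root]
--
--     return result
-- ===== SOURCE B (Python) =====
-- def python_components(adj):
--     """Connected components by breadth-first set closure over an undirected adjacency map."""
--     g = {n: [] for n in adj}
--     for n, nbrs in adj.items():
--         for m, _ in nbrs:
--             g[n].append(m)
--             g[m].append(n)
--     comp_id = {}
--     next_id = 0
--     for s in sorted(g):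
--         if s in comp_id:
--             continue
--         comp = {s}
--         while True:
--             grown = comp | {v for u in comp for v in g[u]}
--             if grown == comp:
--                 break
--             comp = grown
--         for v in comp:
--             comp_id[v] = next_id
--         next_id += 1
--     return {n: comp_id[n] for n in sorted(g)}
-- ===== Notes on version B (the rewrite author's own statement) =====
-- stated objective: alternative
-- what changed: Replaced the union-find-with-path-compression-and-rank algorithm by building an undirected adjacency map and labelling each connected component via a breadth-first set-closure, assigning ids in first-seen sorted order; both raise KeyError exactly when a listed neighbour is not a key of adj, which Pre_ excludes.
import Mathlib
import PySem

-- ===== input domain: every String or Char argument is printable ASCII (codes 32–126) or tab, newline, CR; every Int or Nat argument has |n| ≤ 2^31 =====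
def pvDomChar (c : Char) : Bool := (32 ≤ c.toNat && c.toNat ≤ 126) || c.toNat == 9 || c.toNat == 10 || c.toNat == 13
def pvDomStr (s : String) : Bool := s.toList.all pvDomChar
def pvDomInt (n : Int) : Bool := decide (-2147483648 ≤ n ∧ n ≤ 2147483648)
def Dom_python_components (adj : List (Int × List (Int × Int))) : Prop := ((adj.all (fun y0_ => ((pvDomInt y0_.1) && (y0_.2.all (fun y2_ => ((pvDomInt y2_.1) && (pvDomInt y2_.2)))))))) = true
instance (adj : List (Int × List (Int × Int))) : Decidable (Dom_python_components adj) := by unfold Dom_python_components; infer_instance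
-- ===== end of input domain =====

-- B replaces A's union-find (path compression + union by rank) with a breadth-first set-closure
-- over an undirected adjacency map, assigning component ids in first-seen sorted order
-- (objective: alternative algorithm of similar cost; same KeyError inputs excluded by Pre_).

-- ===== PORT A =====
-- find(x): while parent[x] != x: parent[x] = parent[parent[x]]; x = parent[x]
-- (fuel is only a totality guard; ≥ number of keys suffices on Pre_ inputs, proved in pvFind_spec)


def pvFind (fuel : Nat) (parent : PySem.Dict Int Int) (x : Int) : PySem.Dict Int Int × Int :=
  match fuel with
  | 0 => (parent, x)
  | fuel + 1 =>
    let px := parent.getD x x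
    if px = x then (parent, x)
    else
      let g := parent.getD px px
      pvFind fuel (parent.insert x g) g

-- union(x, y) acting on the state (parent, rank)

def pvUnion (fuel : Nat) (st : PySem.Dict Int Int × PySem.Dict Int Int) (x y : Int) :
    PySem.Dict Int Int × PySem.Dict Int Int :=
  let f1 := pvFind fuel st.1 x
  let f2 := pvFind fuel f1.1 y
  let p2 := f2.1
  let rx0 := f1.2
  let ry0 := f2.2
  let rank := st.2
  if rx0 = ry0 then (p2, rank)
  else
    let rx := if rank.getD rx0 0 < rank.getD ry0 0 then ry0 else rx0
    let ry := if rank.getD rx0 0 < rank.getD ry0 0 then rx0 else ry0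
    let p3 := p2.insert ry rx
    let rank' := if rank.getD rx 0 = rank.getD ry 0 then rank.insert rx (rank.getD rx 0 + 1) else rank
    (p3, rank')

-- the body of A's normalization loop: root = find(node); number new roots; result[node] = id

def aStep (fuel : Nat) (acc : PySem.Dict Int Int × PySem.Dict Int Int × PySem.Dict Int Int)
    (n : Int) : PySem.Dict Int Int × PySem.Dict Int Int × PySem.Dict Int Int :=
  let fr := pvFind fuel acc.1 n
  let cm := if acc.2.1.contains fr.2 then acc.2.1 else acc.2.1.insert fr.2 (acc.2.1.size : Int)
  (fr.1, cm, acc.2.2.insert n (cm.getD fr.2 0))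

def python_components (adj : List (Int × List (Int × Int))) : List (Int × Int) :=
  let d := PySem.Dict.ofList adj
  let ks := d.keys
  let fuel := ks.length
  let parent0 := ks.foldl (fun (p : PySem.Dict Int Int) n => p.insert n n) PySem.Dict.empty
  let rank0 := ks.foldl (fun (p : PySem.Dict Int Int) n => p.insert n 0) PySem.Dict.empty
  let st := ks.foldl (fun st n => (d.getD n []).foldl (fun st q => pvUnion fuel st n q.1) st)
      (parent0, rank0)
  let fin := (PySem.List.sorted ks (fun x => x) false).foldl (aStep fuel)
      (st.1, PySem.Dict.empty, PySem.Dict.empty)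
  fin.2.2.items

-- ===== PORT B =====
-- grown = comp | {v for u in comp for v in g[u]}

def pvGrow (g : PySem.Dict Int (List Int)) (comp : PySem.Set Int) : PySem.Set Int :=
  PySem.Set.union comp (comp.flatMap (fun u => g.getD u []))

-- the 'while True: … if grown == comp: break' closure loop (fuel is only a totality guard)

def pvGrowLoop (g : PySem.Dict Int (List Int)) : Nat → PySem.Set Int → PySem.Set Int
  | 0, comp => comp
  | fuel + 1, comp =>
    let grown := pvGrow g comp
    if PySem.Set.equal grown comp then comp else pvGrowLoop g fuel grown

-- the body of B's loop over sorted nodes: label a whole unvisited component at once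

def bStep (g : PySem.Dict Int (List Int)) (fuel : Nat) (acc : PySem.Dict Int Int × Int)
    (s : Int) : PySem.Dict Int Int × Int :=
  if acc.1.contains s then acc
  else
    let comp := pvGrowLoop g fuel (PySem.Set.add PySem.Set.empty s)
    (comp.foldl (fun cid v => cid.insert v acc.2) acc.1, acc.2 + 1)

def python_components_alt (adj : List (Int × List (Int × Int))) : List (Int × Int) :=
  let d := PySem.Dict.ofList adj
  let g0 := d.keys.foldl (fun (g : PySem.Dict Int (List Int)) n => g.insert n []) PySem.Dict.empty
  let g := d.items.foldl (fun g p =>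
      p.2.foldl (fun g q =>
        (g.modify p.1 [] (· ++ [q.1])).modify q.1 [] (· ++ [p.1])) g) g0
  let ks := PySem.List.sorted d.keys (fun x => x) false
  let fin := ks.foldl (bStep g (d.keys.length + 1)) (PySem.Dict.empty, 0)
  ks.map (fun n => (n, fin.1.getD n 0))

-- ===== PRECONDITION & SPEC =====
-- Pre_ excludes exactly the inputs on which some listed neighbour is not a key of the dict:
-- there Python A raises KeyError (in find) and Python B raises KeyError too (building g).
def Pre_python_components (adj : List (Int × List (Int × Int))) : Prop :=
  ∀ p ∈ (PySem.Dict.ofList adj).items, ∀ q ∈ p.2, q.1 ∈ (PySem.Dict.ofList adj).keys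
instance (adj : List (Int × List (Int × Int))) : Decidable (Pre_python_components adj) := by
  unfold Pre_python_components; infer_instance

def pvWitness_python_components : (List (Int × List (Int × Int))) :=
  [(1, [(2, 0)]), (2, []), (5, [])]

def Spec_python_components (adj : List (Int × List (Int × Int))) (out : List (Int × Int)) : Prop :=
  out = python_components_alt adj
instance (adj : List (Int × List (Int × Int))) (out : List (Int × Int)) :
    Decidable (Spec_python_components adj out) := by unfold Spec_python_components; infer_instance

-- ===== CLAIM (what is proved, stated in full; the proofs are below) =====
def Claim_equal_python_components : Prop :=
  ∀ (adj : List (Int × List (Int × Int))), Dom_python_components adj →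
    Pre_python_components adj → Spec_python_components adj (python_components adj)

-- ===== LEMMAS AND PROOFS =====

def pfun (p : PySem.Dict Int Int) : Int → Int := fun z => p.getD z z

def Reaches (f : Int → Int) (z r : Int) : Prop := (∃ n, f^[n] z = r) ∧ f r = r

def Acyclic (f : Int → Int) : Prop := ∀ z, ∃ r, Reaches f z r

def CKeys (K : List Int) (f : Int → Int) : Prop := ∀ z, f z ≠ z → z ∈ K ∧ f z ∈ K

lemma iterate_past {f : Int → Int} {z r : Int} {n : Nat} (hn : f^[n] z = r) (hr : f r = r)
    {m : Nat} (hle : n ≤ m) : f^[m] z = r := by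
  have h2 := Function.iterate_add_apply f (m - n) n z
  rw [hn] at h2
  rw [show m = m - n + n by omega, h2, Function.iterate_fixed hr]

lemma reaches_unique {f : Int → Int} {z r r' : Int} (h : Reaches f z r) (h' : Reaches f z r') :
    r = r' := by
  obtain ⟨⟨n, hn⟩, hr⟩ := h
  obtain ⟨⟨m, hm⟩, hr'⟩ := h'
  rcases le_total n m with hle | hle
  · rw [← iterate_past hn hr hle, hm]
  · rw [← iterate_past hm hr' hle, hn]

lemma reaches_step {f : Int → Int} {z r : Int} (h : Reaches f (f z) r) : Reaches f z r := by
  obtain ⟨⟨n, hn⟩, hr⟩ := h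
  exact ⟨⟨n + 1, by rw [Function.iterate_succ_apply]; exact hn⟩, hr⟩

lemma reaches_mem {K : List Int} {f : Int → Int} (hK : CKeys K f) {z r : Int}
    (hz : z ∈ K) (h : Reaches f z r) : r ∈ K := by
  obtain ⟨⟨n, hn⟩, hr⟩ := h
  induction n generalizing z with
  | zero => simpa [← hn]
  | succ n ih =>
    rw [Function.iterate_succ_apply] at hn
    by_cases hfz : f z = z
    · rw [hfz] at hn; exact ih hz hn
    · exact ih (hK z hfz).2 hn

lemma pfun_insert (p : PySem.Dict Int Int) (a b : Int) :
    pfun (p.insert a b) = Function.update (pfun p) a b := by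
  funext z
  simp [pfun, PySem.Dict.getD_insert, Function.update_apply]

lemma compress_orbit (f : Int → Int) (a : Int) :
    ∀ (n : Nat) (z r : Int), f^[n] z = r → f r = r →
      ∃ m ≤ n, (Function.update f a (f (f a)))^[m] z = r := by
  intro n
  induction n using Nat.strong_induction_on with
  | _ n IH =>
    intro z r hn hr
    match n, hn with
    | 0, hn => exact ⟨0, le_rfl, hn⟩
    | 1, hn =>
      by_cases hza : z = a
      · subst hza
        refine ⟨1, le_rfl, ?_⟩
        simp only [Function.iterate_one] at hn ⊢
        rw [Function.update_self, hn, hr]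
      · refine ⟨1, le_rfl, ?_⟩
        simp only [Function.iterate_one] at hn ⊢
        rw [Function.update_of_ne hza]
        exact hn
    | (k+2), hn =>
      by_cases hza : z = a
      · subst hza
        have hn' : f^[k] (f (f z)) = r := by
          rw [← Function.iterate_succ_apply, ← Function.iterate_succ_apply]; exact hn
        obtain ⟨m, hm, hm2⟩ := IH k (by omega) _ _ hn' hr
        refine ⟨m + 1, by omega, ?_⟩
        rw [Function.iterate_succ_apply, Function.update_self]
        exact hm2
      · have hn' : f^[k+1] (f z) = r := by
          rw [← Function.iterate_succ_apply]; exact hn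
        obtain ⟨m, hm, hm2⟩ := IH (k+1) (by omega) _ _ hn' hr
        refine ⟨m + 1, by omega, ?_⟩
        rw [Function.iterate_succ_apply, Function.update_of_ne hza]
        exact hm2

lemma two_cycle_fix {f : Int → Int} {a : Int} (hA : Acyclic f) (h : f (f a) = a) : f a = a := by
  by_contra hfa
  have horb : ∀ n, f^[n] a = a ∨ f^[n] a = f a := by
    intro n
    induction n with
    | zero => left; rfl
    | succ n ih =>
      rw [Function.iterate_succ_apply']
      rcases ih with h1 | h1 <;> rw [h1]
      · right; rfl
      · left; exact h
  obtain ⟨r, ⟨n, hn⟩, hr⟩ := hA a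
  rcases horb n with h1 | h1 <;> rw [hn] at h1 <;> subst h1
  · exact hfa hr
  · rw [h] at hr; exact hfa hr.symm

lemma compress_fix {f : Int → Int} (a : Int) (hA : Acyclic f) {r : Int} :
    f r = r ↔ Function.update f a (f (f a)) r = r := by
  by_cases hra : r = a
  · subst hra
    rw [Function.update_self]
    constructor
    · intro h; rw [h, h]
    · intro h; exact two_cycle_fix hA h
  · rw [Function.update_of_ne hra]

lemma compress_reaches {f : Int → Int} (a : Int) (hA : Acyclic f) (z r : Int) :
    Reaches (Function.update f a (f (f a))) z r ↔ Reaches f z r := by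
  constructor
  · rintro ⟨⟨m, hm⟩, hr⟩
    have hfr : f r = r := (compress_fix a hA).mpr hr
    clear hr
    induction m generalizing z with
    | zero => exact ⟨⟨0, hm⟩, hfr⟩
    | succ m ih =>
      rw [Function.iterate_succ_apply] at hm
      have h2 := ih _ hm
      by_cases hza : z = a
      · subst hza
        rw [Function.update_self] at h2
        exact reaches_step (reaches_step h2)
      · rw [Function.update_of_ne hza] at h2
        exact reaches_step h2
  · rintro ⟨⟨n, hn⟩, hr⟩
    obtain ⟨m, _, hm⟩ := compress_orbit f a n z r hn hr
    exact ⟨⟨m, hm⟩, (compress_fix a hA).mp hr⟩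

lemma union_reaches_fwd {f : Int → Int} {ra rb : Int} (hra : f ra = ra) (hrb : f rb = rb)
    (hne : ra ≠ rb) {z r : Int} (h : Reaches f z r) :
    Reaches (Function.update f rb ra) z (if r = rb then ra else r) := by
  obtain ⟨⟨n, hn⟩, hr⟩ := h
  have hfix : Function.update f rb ra (if r = rb then ra else r) = (if r = rb then ra else r) := by
    by_cases hcase : r = rb
    · rw [if_pos hcase, Function.update_of_ne hne]; exact hra
    · rw [if_neg hcase, Function.update_of_ne hcase]; exact hr
  refine ⟨?_, hfix⟩
  induction n generalizing z with
  | zero =>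
    simp only [Function.iterate_zero_apply] at hn
    subst hn
    by_cases hcase : z = rb
    · refine ⟨1, ?_⟩
      rw [if_pos hcase, Function.iterate_one, hcase, Function.update_self]
    · exact ⟨0, by rw [if_neg hcase, Function.iterate_zero_apply]⟩
  | succ n ih =>
    rw [Function.iterate_succ_apply] at hn
    by_cases hzb : z = rb
    · rw [hzb] at hn ⊢
      rw [hrb, Function.iterate_fixed hrb] at hn
      subst hn
      refine ⟨1, ?_⟩
      rw [if_pos rfl, Function.iterate_one, Function.update_self]
    · obtain ⟨m, hm⟩ := ih hn
      exact ⟨m + 1, by rw [Function.iterate_succ_apply, Function.update_of_ne hzb]; exact hm⟩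

lemma union_reaches_bwd {f : Int → Int} {ra rb : Int} (hra : f ra = ra) (hrb : f rb = rb)
    (hne : ra ≠ rb) {z r' : Int} (h : Reaches (Function.update f rb ra) z r') :
    ∃ r, Reaches f z r ∧ r' = (if r = rb then ra else r) := by
  obtain ⟨⟨m, hm⟩, hfix⟩ := h
  induction m generalizing z with
  | zero =>
    simp only [Function.iterate_zero_apply] at hm
    subst hm
    by_cases hzb : z = rb
    · rw [hzb, Function.update_self] at hfix
      exact absurd hfix hne
    · rw [Function.update_of_ne hzb] at hfix
      exact ⟨z, ⟨⟨0, rfl⟩, hfix⟩, by rw [if_neg hzb]⟩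
  | succ m ih =>
    rw [Function.iterate_succ_apply] at hm
    by_cases hzb : z = rb
    · have hm' : (Function.update f rb ra)^[m] ra = r' := by
        rw [hzb, Function.update_self] at hm; exact hm
      obtain ⟨r, hr1, hr2⟩ := ih hm'
      have hrra : r = ra := reaches_unique hr1 ⟨⟨0, rfl⟩, hra⟩
      subst hrra
      simp only [if_neg hne] at hr2
      refine ⟨rb, ⟨⟨0, by simpa using hzb⟩, hrb⟩, ?_⟩
      rw [if_pos rfl]
      simpa using hr2
    · rw [Function.update_of_ne hzb] at hm
      obtain ⟨r, hr1, hr2⟩ := ih hm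
      exact ⟨r, reaches_step hr1, hr2⟩

lemma orbit_bound {K : List Int} {f : Int → Int} (hA : Acyclic f) (hK : CKeys K f)
    (hnd : K.Nodup) (z : Int) : ∃ n r, n ≤ K.length ∧ f^[n] z = r ∧ f r = r := by
  classical
  obtain ⟨r0, ⟨n0, hn0⟩, hr0⟩ := hA z
  have hP : ∃ n, f (f^[n] z) = f^[n] z := ⟨n0, by rw [hn0, hr0]⟩
  set N := Nat.find hP with hN
  have hNfix : f (f^[N] z) = f^[N] z := Nat.find_spec hP
  have hNmin : ∀ i, i < N → f (f^[i] z) ≠ f^[i] z := fun i hi => Nat.find_min hP hi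
  refine ⟨N, f^[N] z, ?_, rfl, hNfix⟩
  -- pigeonhole: the first N orbit points are distinct and lie in K
  have hinj : ∀ i ∈ List.range N, ∀ j ∈ List.range N, f^[i] z = f^[j] z → i = j := by
    have key : ∀ i j, i < j → j ≤ N → f^[i] z = f^[j] z → False := by
      intro i j hij hjN heq
      have hper : ∀ k, f^[i + k * (j - i)] z = f^[i] z := by
        intro k
        induction k with
        | zero => simp
        | succ k ih =>
          have h1 : i + (k + 1) * (j - i) = (j - i) + (i + k * (j - i)) := by ring
          rw [h1, Function.iterate_add_apply, ih, ← Function.iterate_add_apply]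
          rw [show j - i + i = j by omega]
          exact heq.symm
      have hbig : f^[i + N * (j - i)] z = f^[N] z := by
        apply iterate_past rfl hNfix
        have : 1 ≤ j - i := by omega
        nlinarith [Nat.le_of_lt hij]
      have : f^[i] z = f^[N] z := by rw [← hper N, hbig]
      exact hNmin i (by omega) (by rw [this]; exact hNfix)
    intro i hi j hj heq
    simp only [List.mem_range] at hi hj
    rcases lt_trichotomy i j with h | h | h
    · exact absurd heq (fun e => key i j h (by omega) e)
    · exact h
    · exact absurd heq.symm (fun e => key j i h (by omega) e)
  have hLnd : ((List.range N).map (fun i => f^[i] z)).Nodup :=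
    (List.nodup_range).map_on (fun i hi j hj => hinj i hi j hj)
  have hsub : ((List.range N).map (fun i => f^[i] z)) ⊆ K := by
    intro x hx
    simp only [List.mem_map, List.mem_range] at hx
    obtain ⟨i, hi, rfl⟩ := hx
    exact (hK _ (hNmin i hi)).1
  have := (List.subperm_of_subset hLnd hsub).length_le
  simpa using this

def SameRoot (f : Int → Int) (z w : Int) : Prop := ∃ r, Reaches f z r ∧ Reaches f w r

noncomputable def rootFun (f : Int → Int) (hA : Acyclic f) (z : Int) : Int := (hA z).choose

lemma rootFun_reaches (f : Int → Int) (hA : Acyclic f) (z : Int) : Reaches f z (rootFun f hA z) :=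
  (hA z).choose_spec

lemma pvFind_spec {K : List Int} :
    ∀ (fuel n : Nat) (p : PySem.Dict Int Int) (x r : Int),
      (pfun p)^[n] x = r → pfun p r = r → n ≤ fuel → Acyclic (pfun p) → CKeys K (pfun p) →
      (pvFind fuel p x).2 = r ∧
      (∀ z w, Reaches (pfun (pvFind fuel p x).1) z w ↔ Reaches (pfun p) z w) ∧
      CKeys K (pfun (pvFind fuel p x).1) := by
  intro fuel
  induction fuel with
  | zero =>
    intro n p x r hn hr hle hA hK
    have hn0 : n = 0 := by omega
    subst hn0
    simp only [Function.iterate_zero_apply] at hn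
    subst hn
    exact ⟨rfl, fun z w => Iff.rfl, hK⟩
  | succ fuel IH =>
    intro n p x r hn hr hle hA hK
    by_cases hpx : p.getD x x = x
    · have hxr : x = r :=
        reaches_unique (f := pfun p) ⟨⟨0, rfl⟩, hpx⟩ ⟨⟨n, hn⟩, hr⟩
      have hstep : pvFind (fuel + 1) p x = (p, x) := by simp [pvFind, hpx]
      rw [hstep]
      exact ⟨hxr, fun z w => Iff.rfl, hK⟩
    · have hfx : pfun p x ≠ x := hpx
      have hstep : pvFind (fuel + 1) p x =
          pvFind fuel (p.insert x (p.getD (p.getD x x) (p.getD x x)))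
            (p.getD (p.getD x x) (p.getD x x)) := by
        simp [pvFind, hpx]
      rcases n with _ | k
      · simp only [Function.iterate_zero_apply] at hn
        subst hn
        exact absurd hr hfx
      · have hup : pfun (p.insert x (p.getD (p.getD x x) (p.getD x x)))
            = Function.update (pfun p) x (pfun p (pfun p x)) := by
          rw [pfun_insert]; rfl
        have horb : ∃ t ≤ k, (pfun p)^[t] (pfun p (pfun p x)) = r := by
          rcases k with _ | j
          · refine ⟨0, le_rfl, ?_⟩
            have hn1 : pfun p x = r := by simpa using hn
            simp only [Function.iterate_zero_apply]
            rw [hn1, hr]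
          · refine ⟨j, by omega, ?_⟩
            rw [← Function.iterate_succ_apply, ← Function.iterate_succ_apply]
            exact hn
        obtain ⟨t, ht, horb⟩ := horb
        obtain ⟨m, hm, hmorb⟩ := compress_orbit (pfun p) x t (pfun p (pfun p x)) r horb hr
        have hA' : Acyclic (pfun (p.insert x (p.getD (p.getD x x) (p.getD x x)))) := by
          rw [hup]
          intro z
          obtain ⟨rr, hrr⟩ := hA z
          exact ⟨rr, (compress_reaches x hA z rr).mpr hrr⟩
        have hK' : CKeys K (pfun (p.insert x (p.getD (p.getD x x) (p.getD x x)))) := by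
          rw [hup]
          intro z hz
          by_cases hzx : z = x
          · subst hzx
            rw [Function.update_self] at hz ⊢
            have hx1 := hK z hfx
            refine ⟨hx1.1, ?_⟩
            by_cases h2 : pfun p (pfun p z) = pfun p z
            · rw [h2]; exact hx1.2
            · exact (hK (pfun p z) h2).2
          · rw [Function.update_of_ne hzx] at hz ⊢
            exact hK z hz
        have horb2 : (pfun (p.insert x (p.getD (p.getD x x) (p.getD x x))))^[m]
            (p.getD (p.getD x x) (p.getD x x)) = r := by
          rw [hup]
          exact hmorb
        have hr2 : pfun (p.insert x (p.getD (p.getD x x) (p.getD x x))) r = r := by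
          rw [hup]
          exact (compress_fix x hA).mp hr
        have hres := IH m (p.insert x (p.getD (p.getD x x) (p.getD x x)))
          (p.getD (p.getD x x) (p.getD x x)) r horb2 hr2 (by omega) hA' hK'
        rw [hstep]
        refine ⟨hres.1, ?_, hres.2.2⟩
        intro z w
        refine (hres.2.1 z w).trans ?_
        rw [hup]
        exact compress_reaches x hA z w

def pvRel (es : List (Int × Int)) (x y : Int) : Prop := (x, y) ∈ es ∨ (y, x) ∈ es

def Conn (es : List (Int × Int)) (x y : Int) : Prop := Relation.EqvGen (pvRel es) x y

lemma conn_refl {es : List (Int × Int)} (x : Int) : Conn es x x := Relation.EqvGen.refl x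

lemma conn_symm {es : List (Int × Int)} {x y : Int} (h : Conn es x y) : Conn es y x :=
  Relation.EqvGen.symm x y h

lemma conn_trans {es : List (Int × Int)} {x y z : Int} (h : Conn es x y) (h' : Conn es y z) :
    Conn es x z := Relation.EqvGen.trans x y z h h'

lemma conn_nil {x y : Int} : Conn [] x y ↔ x = y := by
  constructor
  · intro h
    induction h with
    | rel a b h => rcases h with h | h <;> simp at h
    | refl a => rfl
    | symm a b _ ih => exact ih.symm
    | trans a b c _ _ ih1 ih2 => exact ih1.trans ih2
  · rintro rfl; exact conn_refl x

lemma conn_of_sub {es es' : List (Int × Int)} (hsub : ∀ e ∈ es, e ∈ es') {x y : Int}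
    (h : Conn es x y) : Conn es' x y := by
  refine Relation.EqvGen.mono ?_ h
  intro a b hab
  rcases hab with h1 | h1
  · exact Or.inl (hsub _ h1)
  · exact Or.inr (hsub _ h1)

lemma conn_append {es : List (Int × Int)} {a b : Int} (x y : Int) :
    Conn (es ++ [(a, b)]) x y ↔
      Conn es x y ∨ (Conn es x a ∧ Conn es b y) ∨ (Conn es x b ∧ Conn es a y) := by
  constructor
  · intro h
    induction h with
    | rel u v h =>
      rcases h with h1 | h1 <;> rw [List.mem_append] at h1 <;>
        rcases h1 with h2 | h2
      · exact Or.inl (Relation.EqvGen.rel u v (Or.inl h2))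
      · simp only [List.mem_singleton, Prod.mk.injEq] at h2
        obtain ⟨rfl, rfl⟩ := h2
        exact Or.inr (Or.inl ⟨conn_refl u, conn_refl v⟩)
      · exact Or.inl (Relation.EqvGen.rel u v (Or.inr h2))
      · simp only [List.mem_singleton, Prod.mk.injEq] at h2
        obtain ⟨rfl, rfl⟩ := h2
        exact Or.inr (Or.inr ⟨conn_refl u, conn_refl v⟩)
    | refl u => exact Or.inl (conn_refl u)
    | symm u v _ ih =>
      rcases ih with h1 | ⟨h1, h2⟩ | ⟨h1, h2⟩
      · exact Or.inl (conn_symm h1)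
      · exact Or.inr (Or.inr ⟨conn_symm h2, conn_symm h1⟩)
      · exact Or.inr (Or.inl ⟨conn_symm h2, conn_symm h1⟩)
    | trans u v w _ _ ih1 ih2 =>
      rcases ih1 with h1 | ⟨h1, h2⟩ | ⟨h1, h2⟩ <;>
        rcases ih2 with h3 | ⟨h3, h4⟩ | ⟨h3, h4⟩
      · exact Or.inl (conn_trans h1 h3)
      · exact Or.inr (Or.inl ⟨conn_trans h1 h3, h4⟩)
      · exact Or.inr (Or.inr ⟨conn_trans h1 h3, h4⟩)
      · exact Or.inr (Or.inl ⟨h1, conn_trans h2 h3⟩)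
      · exact Or.inl (conn_trans h1 (conn_trans (conn_symm (conn_trans h2 h3)) h4))
      · exact Or.inl (conn_trans h1 h4)
      · exact Or.inr (Or.inr ⟨h1, conn_trans h2 h3⟩)
      · exact Or.inl (conn_trans h1 h4)
      · exact Or.inr (Or.inr ⟨h1, h4⟩)
  · intro h
    have hmono : ∀ u v, Conn es u v → Conn (es ++ [(a, b)]) u v :=
      fun u v h => conn_of_sub (fun e he => List.mem_append_left _ he) h
    have hab : Conn (es ++ [(a, b)]) a b :=
      Relation.EqvGen.rel a b (Or.inl (List.mem_append_right _ (List.mem_singleton.mpr rfl)))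
    rcases h with h1 | ⟨h1, h2⟩ | ⟨h1, h2⟩
    · exact hmono _ _ h1
    · exact conn_trans (conn_trans (hmono _ _ h1) hab) (hmono _ _ h2)
    · exact conn_trans (conn_trans (hmono _ _ h1) (conn_symm hab)) (hmono _ _ h2)

lemma union_sameRoot {f : Int → Int} (hA : Acyclic f) {ra rb kk vv : Int}
    (hcase : (vv = rb ∧ kk = ra) ∨ (vv = ra ∧ kk = rb))
    (hra : f ra = ra) (hrb : f rb = rb) (hne : ra ≠ rb) (z w : Int) :
    SameRoot (Function.update f kk vv) z w ↔
      (SameRoot f z w ∨ (Reaches f z ra ∧ Reaches f w rb) ∨ (Reaches f z rb ∧ Reaches f w ra)) := by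
  have hkfix : f kk = kk := by rcases hcase with ⟨_, rfl⟩ | ⟨_, rfl⟩ <;> assumption
  have hvfix : f vv = vv := by rcases hcase with ⟨rfl, _⟩ | ⟨rfl, _⟩ <;> assumption
  have hnevk : vv ≠ kk := by rcases hcase with ⟨rfl, rfl⟩ | ⟨rfl, rfl⟩
                             · exact Ne.symm hne
                             · exact hne
  constructor
  · rintro ⟨r', h1, h2⟩
    obtain ⟨r1, hr1, he1⟩ := union_reaches_bwd hvfix hkfix hnevk h1
    obtain ⟨r2, hr2, he2⟩ := union_reaches_bwd hvfix hkfix hnevk h2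
    by_cases h12 : r1 = r2
    · exact Or.inl ⟨r1, hr1, h12 ▸ hr2⟩
    · have hee : (if r1 = kk then vv else r1) = (if r2 = kk then vv else r2) := by
        rw [← he1, ← he2]
      by_cases hk1 : r1 = kk <;> by_cases hk2 : r2 = kk
      · exact absurd (hk1.trans hk2.symm) h12
      · have hv2 : vv = r2 := by simpa [hk1, hk2] using hee
        rcases hcase with ⟨hv, hk⟩ | ⟨hv, hk⟩
        · -- kk = ra, vv = rb : r1 = ra, r2 = rb
          exact Or.inr (Or.inl ⟨(hk ▸ hk1 : r1 = ra) ▸ hr1, (hv ▸ hv2.symm : r2 = rb) ▸ hr2⟩)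
        · exact Or.inr (Or.inr ⟨(hk ▸ hk1 : r1 = rb) ▸ hr1, (hv ▸ hv2.symm : r2 = ra) ▸ hr2⟩)
      · have hv1 : vv = r1 := by simpa [hk1, hk2] using hee.symm
        rcases hcase with ⟨hv, hk⟩ | ⟨hv, hk⟩
        · exact Or.inr (Or.inr ⟨(hv ▸ hv1.symm : r1 = rb) ▸ hr1, (hk ▸ hk2 : r2 = ra) ▸ hr2⟩)
        · exact Or.inr (Or.inl ⟨(hv ▸ hv1.symm : r1 = ra) ▸ hr1, (hk ▸ hk2 : r2 = rb) ▸ hr2⟩)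
      · exact absurd (by simpa [hk1, hk2] using hee) h12
  · have hfwd : ∀ {u ru : Int}, Reaches f u ru →
        Reaches (Function.update f kk vv) u (if ru = kk then vv else ru) :=
      fun h => union_reaches_fwd hvfix hkfix hnevk h
    rintro (⟨r, h1, h2⟩ | ⟨h1, h2⟩ | ⟨h1, h2⟩)
    · exact ⟨_, hfwd h1, hfwd h2⟩
    · rcases hcase with ⟨hv, hk⟩ | ⟨hv, hk⟩
      · refine ⟨rb, ?_, ?_⟩
        · have h3 := hfwd h1
          rw [if_pos hk.symm, hv] at h3
          rw [hv]
          exact h3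
        · have h3 := hfwd h2
          rwa [if_neg (by rw [hk]; exact fun hh => hne hh.symm)] at h3
      · refine ⟨ra, ?_, ?_⟩
        · have h3 := hfwd h1
          rwa [if_neg (by rw [hk]; exact hne)] at h3
        · have h3 := hfwd h2
          rw [if_pos hk.symm, hv] at h3
          rw [hv]
          exact h3
    · rcases hcase with ⟨hv, hk⟩ | ⟨hv, hk⟩
      · refine ⟨rb, ?_, ?_⟩
        · have h3 := hfwd h1
          rwa [if_neg (by rw [hk]; exact fun hh => hne hh.symm)] at h3
        · have h3 := hfwd h2
          rw [if_pos hk.symm, hv] at h3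
          rw [hv]
          exact h3
      · refine ⟨ra, ?_, ?_⟩
        · have h3 := hfwd h1
          rw [if_pos hk.symm, hv] at h3
          rw [hv]
          exact h3
        · have h3 := hfwd h2
          rwa [if_neg (by rw [hk]; exact hne)] at h3

def UFInv (K : List Int) (es : List (Int × Int)) (p : PySem.Dict Int Int) : Prop :=
  Acyclic (pfun p) ∧ CKeys K (pfun p) ∧ ∀ z w, SameRoot (pfun p) z w ↔ Conn es z w

lemma sameRoot_trans_iff {f : Int → Int} {z r u : Int} (hu : Reaches f u r) :
    Reaches f z r ↔ SameRoot f z u :=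
  ⟨fun h => ⟨r, h, hu⟩, fun ⟨r', h1, h2⟩ => (reaches_unique h2 hu) ▸ h1⟩

lemma pvUnion_inv {K : List Int} {es : List (Int × Int)} {p rk : PySem.Dict Int Int}
    (hInv : UFInv K es p) (hnd : K.Nodup) {a b : Int} (ha : a ∈ K) (hb : b ∈ K) :
    UFInv K (es ++ [(a, b)]) (pvUnion K.length (p, rk) a b).1 := by
  obtain ⟨hA, hK, hSame⟩ := hInv
  obtain ⟨n1, ra, hn1le, hn1, hra⟩ := orbit_bound hA hK hnd a
  obtain ⟨hra', hiff1, hK1⟩ := pvFind_spec (K := K) K.length n1 p a ra hn1 hra hn1le hA hK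
  have hA1 : Acyclic (pfun (pvFind K.length p a).1) :=
    fun z => (hA z).imp (fun r h => (hiff1 z r).mpr h)
  obtain ⟨n2, rb, hn2le, hn2, hrb⟩ := orbit_bound hA1 hK1 hnd b
  obtain ⟨hrb', hiff2, hK2⟩ :=
    pvFind_spec (K := K) K.length n2 (pvFind K.length p a).1 b rb hn2 hrb hn2le hA1 hK1
  have hbody : pvUnion K.length (p, rk) a b =
      (if ra = rb then ((pvFind K.length (pvFind K.length p a).1 b).1, rk)
       else
        ((pvFind K.length (pvFind K.length p a).1 b).1.insert
          (if rk.getD ra 0 < rk.getD rb 0 then ra else rb)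
          (if rk.getD ra 0 < rk.getD rb 0 then rb else ra),
         if rk.getD (if rk.getD ra 0 < rk.getD rb 0 then rb else ra) 0 =
            rk.getD (if rk.getD ra 0 < rk.getD rb 0 then ra else rb) 0
         then rk.insert (if rk.getD ra 0 < rk.getD rb 0 then rb else ra)
            (rk.getD (if rk.getD ra 0 < rk.getD rb 0 then rb else ra) 0 + 1)
         else rk)) := by
    simp only [pvUnion, hra', hrb']
  set p2 := (pvFind K.length (pvFind K.length p a).1 b).1 with hp2
  have hiff : ∀ z w, Reaches (pfun p2) z w ↔ Reaches (pfun p) z w :=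
    fun z w => (hiff2 z w).trans (hiff1 z w)
  have hA2 : Acyclic (pfun p2) := fun z => (hA z).imp (fun r h => (hiff z r).mpr h)
  have hRa : Reaches (pfun p) a ra := ⟨⟨n1, hn1⟩, hra⟩
  have hRb : Reaches (pfun p) b rb := (hiff1 b rb).mp ⟨⟨n2, hn2⟩, hrb⟩
  have hraK : ra ∈ K := reaches_mem hK ha hRa
  have hrbK : rb ∈ K := reaches_mem hK hb hRb
  have hfra : pfun p ra = ra := hRa.2
  have hfrb : pfun p rb = rb := hRb.2
  have hra2 : pfun p2 ra = ra := ((hiff ra ra).mpr ⟨⟨0, rfl⟩, hfra⟩).2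
  have hrb2 : pfun p2 rb = rb := ((hiff rb rb).mpr ⟨⟨0, rfl⟩, hfrb⟩).2
  have hSame2 : ∀ z w, SameRoot (pfun p2) z w ↔ SameRoot (pfun p) z w := by
    intro z w
    constructor
    · rintro ⟨r, h1, h2⟩; exact ⟨r, (hiff z r).mp h1, (hiff w r).mp h2⟩
    · rintro ⟨r, h1, h2⟩; exact ⟨r, (hiff z r).mpr h1, (hiff w r).mpr h2⟩
  by_cases heq : ra = rb
  · rw [hbody, if_pos heq]
    refine ⟨hA2, hK2, ?_⟩
    intro z w
    have hconn_ab : Conn es a b := (hSame a b).mp ⟨ra, hRa, heq ▸ hRb⟩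
    rw [hSame2 z w, hSame z w, conn_append z w]
    constructor
    · exact Or.inl
    · rintro (h | ⟨h1, h2⟩ | ⟨h1, h2⟩)
      · exact h
      · exact conn_trans h1 (conn_trans hconn_ab h2)
      · exact conn_trans h1 (conn_trans (conn_symm hconn_ab) h2)
  · rw [hbody, if_neg heq]
    set kk := if rk.getD ra 0 < rk.getD rb 0 then ra else rb with hkk
    set vv := if rk.getD ra 0 < rk.getD rb 0 then rb else ra with hvv
    have hcase : (vv = rb ∧ kk = ra) ∨ (vv = ra ∧ kk = rb) := by
      by_cases hcnd : rk.getD ra 0 < rk.getD rb 0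
      · exact Or.inl ⟨by rw [hvv, if_pos hcnd], by rw [hkk, if_pos hcnd]⟩
      · exact Or.inr ⟨by rw [hvv, if_neg hcnd], by rw [hkk, if_neg hcnd]⟩
    clear_value kk vv
    have hkK : kk ∈ K := by rcases hcase with ⟨_, hk⟩ | ⟨_, hk⟩ <;> rw [hk] <;> assumption
    have hvK : vv ∈ K := by rcases hcase with ⟨hv, _⟩ | ⟨hv, _⟩ <;> rw [hv] <;> assumption
    have hkfix : pfun p2 kk = kk := by
      rcases hcase with ⟨_, hk⟩ | ⟨_, hk⟩ <;> rw [hk] <;> assumption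
    have hvfix : pfun p2 vv = vv := by
      rcases hcase with ⟨hv, _⟩ | ⟨hv, _⟩ <;> rw [hv] <;> assumption
    have hnevk : vv ≠ kk := by
      rcases hcase with ⟨hv, hk⟩ | ⟨hv, hk⟩ <;> rw [hv, hk]
      · exact fun h => heq h.symm
      · exact heq
    have hpf3 : pfun (p2.insert kk vv) = Function.update (pfun p2) kk vv := pfun_insert p2 kk vv
    have e1 : ∀ u, Reaches (pfun p2) u ra ↔ Conn es u a := fun u =>
      (hiff u ra).trans ((sameRoot_trans_iff hRa).trans (hSame u a))
    have e2 : ∀ u, Reaches (pfun p2) u rb ↔ Conn es u b := fun u =>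
      (hiff u rb).trans ((sameRoot_trans_iff hRb).trans (hSame u b))
    have e0 : ∀ z w, SameRoot (pfun p2) z w ↔ Conn es z w :=
      fun z w => (hSame2 z w).trans (hSame z w)
    refine ⟨?_, ?_, ?_⟩
    · intro z
      obtain ⟨r, h⟩ := hA2 z
      rw [hpf3]
      exact ⟨_, union_reaches_fwd hvfix hkfix hnevk h⟩
    · rw [hpf3]
      intro z hz
      by_cases hzk : z = kk
      · subst hzk
        rw [Function.update_self]
        exact ⟨hkK, hvK⟩
      · rw [Function.update_of_ne hzk] at hz ⊢
        exact hK2 z hz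
    · intro z w
      rw [hpf3, union_sameRoot hA2 hcase hra2 hrb2 heq z w, conn_append z w]
      constructor
      · rintro (h | ⟨h1, h2⟩ | ⟨h1, h2⟩)
        · exact Or.inl ((e0 z w).mp h)
        · exact Or.inr (Or.inl ⟨(e1 z).mp h1, conn_symm ((e2 w).mp h2)⟩)
        · exact Or.inr (Or.inr ⟨(e2 z).mp h1, conn_symm ((e1 w).mp h2)⟩)
      · rintro (h | ⟨h1, h2⟩ | ⟨h1, h2⟩)
        · exact Or.inl ((e0 z w).mpr h)
        · exact Or.inr (Or.inl ⟨(e1 z).mpr h1, (e2 w).mpr (conn_symm h2)⟩)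
        · exact Or.inr (Or.inr ⟨(e2 z).mpr h1, (e1 w).mpr (conn_symm h2)⟩)

lemma idxOf_append_not_mem (l t : List Int) (v : Int) (h : v ∉ l) :
    (l ++ v :: t).idxOf v = l.length := by
  induction l with
  | nil => simp
  | cons a l ih =>
    have hav : (a == v) = false := by
      simp only [beq_eq_false_iff_ne]
      exact fun hh => h (by rw [hh]; exact List.mem_cons_self)
    simp only [List.cons_append, List.idxOf_cons, hav, cond_false]
    rw [ih (fun hh => h (List.mem_cons_of_mem a hh))]
    rfl

lemma pfun_foldl_insert_self (K : List Int) :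
    ∀ (d : PySem.Dict Int Int), (∀ z, pfun d z = z) →
      ∀ z, pfun (K.foldl (fun p n => p.insert n n) d) z = z := by
  induction K with
  | nil => intro d hd; exact hd
  | cons n t ih =>
    intro d hd z
    refine ih (d.insert n n) ?_ z
    intro u
    rw [pfun_insert]
    by_cases hun : u = n
    · subst hun; rw [Function.update_self]
    · rw [Function.update_of_ne hun]; exact hd u

lemma pfun_empty (z : Int) : pfun (PySem.Dict.empty : PySem.Dict Int Int) z = z := by
  simp [pfun, PySem.Dict.getD_empty]

lemma reaches_of_id {f : Int → Int} (hf : ∀ z, f z = z) {z r : Int} (h : Reaches f z r) :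
    r = z := by
  obtain ⟨⟨n, hn⟩, _⟩ := h
  rw [← hn, Function.iterate_fixed (hf z)]

lemma UFInv_init (K : List Int) :
    UFInv K [] (K.foldl (fun p n => p.insert n n) PySem.Dict.empty) := by
  have hid : ∀ z, pfun (K.foldl (fun p n => p.insert n n) PySem.Dict.empty) z = z :=
    pfun_foldl_insert_self K PySem.Dict.empty pfun_empty
  refine ⟨fun z => ⟨z, ⟨0, rfl⟩, hid z⟩, fun z hz => absurd (hid z) hz, ?_⟩
  intro z w
  rw [conn_nil]
  constructor
  · rintro ⟨r, h1, h2⟩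
    rw [← reaches_of_id hid h1, ← reaches_of_id hid h2]
  · rintro rfl
    exact ⟨z, ⟨⟨0, rfl⟩, hid z⟩, ⟨⟨0, rfl⟩, hid z⟩⟩

lemma foldl_union_inner {K : List Int} (hnd : K.Nodup) (a : Int) (ha : a ∈ K) :
    ∀ (l : List (Int × Int)) (st : PySem.Dict Int Int × PySem.Dict Int Int)
      (es : List (Int × Int)),
      (∀ q ∈ l, q.1 ∈ K) → UFInv K es st.1 →
      UFInv K (es ++ l.map (fun q => (a, q.1)))
        (l.foldl (fun st q => pvUnion K.length st a q.1) st).1 := by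
  intro l
  induction l with
  | nil => intro st es _ h; simpa using h
  | cons q t ih =>
    intro st es hq hInv
    have h1 := pvUnion_inv (rk := st.2) hInv hnd ha (hq q (List.mem_cons_self))
    rw [Prod.mk.eta] at h1
    have h2 := ih (pvUnion K.length st a q.1) (es ++ [(a, q.1)])
      (fun u hu => hq u (List.mem_cons_of_mem q hu)) h1
    simpa [List.append_assoc] using h2

lemma foldl_union_outer {K : List Int} (hnd : K.Nodup) :
    ∀ (items : List (Int × List (Int × Int))) (st : PySem.Dict Int Int × PySem.Dict Int Int)
      (es : List (Int × Int)),
      (∀ p ∈ items, p.1 ∈ K ∧ ∀ q ∈ p.2, q.1 ∈ K) → UFInv K es st.1 →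
      UFInv K (es ++ items.flatMap (fun p => p.2.map (fun q => (p.1, q.1))))
        (items.foldl (fun st p => p.2.foldl (fun st q => pvUnion K.length st p.1 q.1) st) st).1 := by
  intro items
  induction items with
  | nil => intro st es _ h; simpa using h
  | cons p t ih =>
    intro st es hp hInv
    have h1 := foldl_union_inner hnd p.1 (hp p List.mem_cons_self).1 p.2 st es
      (hp p List.mem_cons_self).2 hInv
    have h2 := ih (p.2.foldl (fun st q => pvUnion K.length st p.1 q.1) st)
      (es ++ p.2.map (fun q => (p.1, q.1)))
      (fun u hu => hp u (List.mem_cons_of_mem p hu)) h1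
    simpa [List.append_assoc] using h2

def Adj (g : PySem.Dict Int (List Int)) (u v : Int) : Prop := v ∈ g.getD u []

lemma getD_foldl_insert_nil (K : List Int) :
    ∀ (d : PySem.Dict Int (List Int)), (∀ u, d.getD u [] = []) →
      ∀ u, (K.foldl (fun g n => g.insert n ([] : List Int)) d).getD u [] = [] := by
  induction K with
  | nil => intro d hd; exact hd
  | cons n t ih =>
    intro d hd u
    refine ih (d.insert n []) ?_ u
    intro v
    rw [PySem.Dict.getD_insert]
    split_ifs with h
    · rfl
    · exact hd v

lemma gfold_inner (a : Int) :
    ∀ (l : List (Int × Int)) (g : PySem.Dict Int (List Int)) (es : List (Int × Int)),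
      (∀ u v, v ∈ g.getD u [] ↔ pvRel es u v) →
      ∀ u v, v ∈ (l.foldl (fun g q =>
          (g.modify a [] (· ++ [q.1])).modify q.1 [] (· ++ [a])) g).getD u [] ↔
        pvRel (es ++ l.map (fun q => (a, q.1))) u v := by
  intro l
  induction l with
  | nil => intro g es hg u v; simpa using hg u v
  | cons q t ih =>
    intro g es hg u v
    have hstep : ∀ u v, v ∈ ((g.modify a [] (· ++ [q.1])).modify q.1 [] (· ++ [a])).getD u [] ↔
        pvRel (es ++ [(a, q.1)]) u v := by
      intro u v
      have hgu := hg u v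
      simp only [PySem.Dict.getD_modify, pvRel, List.mem_append, List.mem_singleton,
        Prod.ext_iff] at hgu ⊢
      split_ifs with h1 h2 h3
      · subst h1
        rw [← h2]
        simp only [List.mem_append, List.mem_singleton]
        tauto
      · subst h1
        simp only [List.mem_append, List.mem_singleton]
        tauto
      · subst h3
        simp only [List.mem_append, List.mem_singleton]
        tauto
      · tauto
    have h2 := ih ((g.modify a [] (· ++ [q.1])).modify q.1 [] (· ++ [a])) (es ++ [(a, q.1)]) hstep u v
    simpa [List.append_assoc] using h2

lemma gfold_outer :
    ∀ (items : List (Int × List (Int × Int))) (g : PySem.Dict Int (List Int))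
      (es : List (Int × Int)),
      (∀ u v, v ∈ g.getD u [] ↔ pvRel es u v) →
      ∀ u v, v ∈ (items.foldl (fun g p => p.2.foldl (fun g q =>
          (g.modify p.1 [] (· ++ [q.1])).modify q.1 [] (· ++ [p.1])) g) g).getD u [] ↔
        pvRel (es ++ items.flatMap (fun p => p.2.map (fun q => (p.1, q.1)))) u v := by
  intro items
  induction items with
  | nil => intro g es hg u v; simpa using hg u v
  | cons p t ih =>
    intro g es hg u v
    have h1 := gfold_inner p.1 p.2 g es hg
    have h2 := ih _ (es ++ p.2.map (fun q => (p.1, q.1))) h1 u v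
    simpa [List.append_assoc] using h2

lemma rtg_iff_conn {g : PySem.Dict Int (List Int)} {E : List (Int × Int)}
    (hadj : ∀ u v, Adj g u v ↔ pvRel E u v) (s x : Int) :
    Relation.ReflTransGen (Adj g) s x ↔ Conn E s x := by
  constructor
  · intro h
    induction h with
    | refl => exact conn_refl s
    | tail _ hbc ih => exact conn_trans ih (Relation.EqvGen.rel _ _ ((hadj _ _).mp hbc))
  · intro h
    have hsymm : Symmetric (Adj g) := by
      intro u v huv
      rw [hadj] at huv ⊢
      rcases huv with h1 | h1
      · exact Or.inr h1
      · exact Or.inl h1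
    induction h with
    | rel u v huv => exact Relation.ReflTransGen.single ((hadj u v).mpr huv)
    | refl => exact Relation.ReflTransGen.refl
    | symm u v _ ih => exact Relation.ReflTransGen.symmetric hsymm ih
    | trans u v w _ _ ih1 ih2 => exact Relation.ReflTransGen.trans ih1 ih2

lemma growLoop_spec {K : List Int} {g : PySem.Dict Int (List Int)}
    (hg : ∀ u v, v ∈ g.getD u [] → v ∈ K) (hnd : K.Nodup) (s : Int) :
    ∀ (fuel : Nat) (comp : PySem.Set Int), comp.Nodup → (∀ x ∈ comp, x ∈ K) →
      (∀ x ∈ comp, Relation.ReflTransGen (Adj g) s x) → s ∈ comp →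
      K.length + 1 ≤ fuel + comp.length →
      ∀ x, x ∈ pvGrowLoop g fuel comp ↔ Relation.ReflTransGen (Adj g) s x := by
  intro fuel
  induction fuel with
  | zero =>
    intro comp hcnd hcK _ _ hfuel x
    have := (List.subperm_of_subset hcnd (fun y hy => hcK y hy)).length_le
    omega
  | succ fuel IH =>
    intro comp hcnd hcK hrtg hs hfuel x
    show x ∈ (if PySem.Set.equal (pvGrow g comp) comp then comp
        else pvGrowLoop g fuel (pvGrow g comp)) ↔ _
    have hmem_grow : ∀ y, y ∈ pvGrow g comp ↔ y ∈ comp ∨ ∃ u ∈ comp, y ∈ g.getD u [] := by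
      intro y
      simp only [pvGrow, PySem.Set.mem_union, List.mem_flatMap]
    split_ifs with heq
    · -- fixed point
      have hclosed : ∀ u ∈ comp, ∀ v ∈ g.getD u [], v ∈ comp := by
        intro u hu v hv
        have := (PySem.Set.equal_iff _ _).mp heq v
        exact this.mp ((hmem_grow v).mpr (Or.inr ⟨u, hu, hv⟩))
      constructor
      · exact hrtg x
      · intro h
        induction h with
        | refl => exact hs
        | tail _ hbc ih => exact hclosed _ ih _ hbc
    · -- grow strictly
      have hgnd : (pvGrow g comp).Nodup := PySem.Set.nodup_union _ _ hcnd
      have hgK : ∀ y ∈ pvGrow g comp, y ∈ K := by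
        intro y hy
        rcases (hmem_grow y).mp hy with h | ⟨u, _, h⟩
        · exact hcK y h
        · exact hg u y h
      have hgrtg : ∀ y ∈ pvGrow g comp, Relation.ReflTransGen (Adj g) s y := by
        intro y hy
        rcases (hmem_grow y).mp hy with h | ⟨u, hu, h⟩
        · exact hrtg y h
        · exact Relation.ReflTransGen.tail (hrtg u hu) h
      have hsub : ∀ y ∈ comp, y ∈ pvGrow g comp := fun y hy => (hmem_grow y).mpr (Or.inl hy)
      have hlen : comp.length + 1 ≤ (pvGrow g comp).length := by
        have hne : ¬∀ y, y ∈ pvGrow g comp ↔ y ∈ comp := by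
          intro hall
          exact heq ((PySem.Set.equal_iff _ _).mpr hall)
        push_neg at hne
        obtain ⟨y, hy⟩ := hne
        have hy2 : y ∈ pvGrow g comp ∧ y ∉ comp := by
          rcases hy with h | h
          · exact h
          · exact absurd (hsub y h.2) h.1
        have : (y :: comp).Subperm (pvGrow g comp) :=
          List.subperm_of_subset (List.nodup_cons.mpr ⟨hy2.2, hcnd⟩)
            (fun u hu => by
              rcases List.mem_cons.mp hu with rfl | hu2
              · exact hy2.1
              · exact hsub u hu2)
        simpa using this.length_le
      exact IH (pvGrow g comp) hgnd hgK hgrtg (hsub s hs) (by omega) x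

lemma foldl_insert_const_get? (c : Int) :
    ∀ (l : List Int) (dd : PySem.Dict Int Int) (x : Int),
      (l.foldl (fun dd v => dd.insert v c) dd).get? x =
        if x ∈ l then some c else dd.get? x := by
  intro l
  induction l with
  | nil => intro dd x; simp
  | cons v t ih =>
    intro dd x
    rw [List.foldl_cons, ih]
    by_cases hxt : x ∈ t
    · rw [if_pos hxt, if_pos (List.mem_cons_of_mem v hxt)]
    · rw [if_neg hxt]
      by_cases hxv : x = v
      · subst hxv
        rw [if_pos List.mem_cons_self, PySem.Dict.get?_insert_self]
      · rw [PySem.Dict.get?_insert_of_ne dd c hxv,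
          if_neg (fun h => by rcases List.mem_cons.mp h with h1 | h1 <;> [exact hxv h1; exact hxt h1])]

lemma sameRoot_iff_gA {f : Int → Int} {gA : Int → Int} (hgA : ∀ z, Reaches f z (gA z))
    (z w : Int) : SameRoot f z w ↔ gA z = gA w := by
  constructor
  · rintro ⟨r, h1, h2⟩
    rw [reaches_unique (hgA z) h1, reaches_unique (hgA w) h2]
  · intro h
    exact ⟨gA z, hgA z, h ▸ hgA w⟩

lemma dedup_split {gA : Int → Int} (pre t : List Int) (n : Int)
    (hn : gA n ∉ PySem.Set.ofList (pre.map gA)) :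
    ∃ extra, PySem.Set.ofList ((pre ++ n :: t).map gA) =
      PySem.Set.ofList (pre.map gA) ++ gA n :: extra := by
  rw [List.map_append, PySem.Set.ofList_append, List.map_cons, PySem.Set.update_cons,
    PySem.Set.add_of_not_mem hn, PySem.Set.update_eq_append_filter]
  exact ⟨_, by rw [List.append_assoc, List.singleton_append]⟩

lemma A_norm_loop {K : List Int} (hnd : K.Nodup) (f : Int → Int) (gA : Int → Int)
    (hgA : ∀ z, Reaches f z (gA z)) (SL : List Int) (hSLnd : SL.Nodup) :
    ∀ (sl pre : List Int) (parent cm res : PySem.Dict Int Int),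
      SL = pre ++ sl →
      (∀ z w, Reaches (pfun parent) z w ↔ Reaches f z w) →
      CKeys K (pfun parent) →
      cm.keys = PySem.Set.ofList (pre.map gA) →
      (∀ v, v ∈ cm.keys →
        cm.get? v = some (((PySem.Set.ofList (SL.map gA)).idxOf v : Int))) →
      res.items = pre.map (fun n => (n, ((PySem.Set.ofList (SL.map gA)).idxOf (gA n) : Int))) →
      (sl.foldl (aStep K.length) (parent, cm, res)).2.2.items
        = SL.map (fun n => (n, ((PySem.Set.ofList (SL.map gA)).idxOf (gA n) : Int))) := by
  intro sl
  induction sl with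
  | nil =>
    intro pre parent cm res hSL _ _ _ _ hres
    rw [List.foldl_nil]
    rw [hres, hSL, List.append_nil]
  | cons n t ih =>
    intro pre parent cm res hSL hReach hKp hcmk hcmg hres
    have hAp : Acyclic (pfun parent) := fun z => ⟨gA z, (hReach z (gA z)).mpr (hgA z)⟩
    obtain ⟨m, r, hmle, hm, hr⟩ := orbit_bound hAp hKp hnd n
    obtain ⟨hr2, hiff, hK2⟩ := pvFind_spec (K := K) K.length m parent n r hm hr hmle hAp hKp
    have hroot : r = gA n := reaches_unique ((hReach n r).mp ⟨⟨m, hm⟩, hr⟩) (hgA n)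
    have hfr2 : (pvFind K.length parent n).2 = gA n := hroot ▸ hr2
    have hReach' : ∀ z w, Reaches (pfun (pvFind K.length parent n).1) z w ↔ Reaches f z w :=
      fun z w => (hiff z w).trans (hReach z w)
    have hnpre : n ∉ pre := by
      rw [hSL] at hSLnd
      intro hc
      exact ((List.nodup_append.mp hSLnd).2.2 n hc n List.mem_cons_self) rfl
    have hreskeys : res.keys = pre := by
      show res.items.map (·.1) = pre
      rw [hres, List.map_map]
      exact List.map_id _
    have hresnc : res.contains n = false := by
      rw [← Bool.not_eq_true, PySem.Dict.contains_iff_mem_keys, hreskeys]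
      exact hnpre
    have hSL' : SL = (pre ++ [n]) ++ t := by rw [hSL]; simp
    rw [List.foldl_cons]
    by_cases hc : cm.contains (gA n) = true
    · -- root already numbered
      have hgmem : gA n ∈ PySem.Set.ofList (pre.map gA) := by
        rw [← hcmk]
        exact (PySem.Dict.contains_iff_mem_keys cm (gA n)).mp hc
      have hval : cm.getD (gA n) 0 = ((PySem.Set.ofList (SL.map gA)).idxOf (gA n) : Int) := by
        rw [PySem.Dict.getD_eq_get?_getD, hcmg (gA n) (hcmk ▸ hgmem)]
        rfl
      have hstep : aStep K.length (parent, cm, res) n = ((pvFind K.length parent n).1, cm,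
          res.insert n ((PySem.Set.ofList (SL.map gA)).idxOf (gA n) : Int)) := by
        simp only [aStep, hfr2, hc, if_true, hval]
      rw [hstep]
      refine ih (pre ++ [n]) (pvFind K.length parent n).1 cm
        (res.insert n ((PySem.Set.ofList (SL.map gA)).idxOf (gA n) : Int)) hSL' hReach' hK2 ?_ hcmg ?_
      · rw [hcmk, List.map_append, PySem.Set.ofList_append, List.map_singleton,
          PySem.Set.update_cons, PySem.Set.add_of_mem hgmem]
        rfl
      · rw [PySem.Dict.items_insert_of_not_contains res _ hresnc, hres, List.map_append,
          List.map_singleton]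
    · -- fresh root: assign the next id
      have hcf : cm.contains (gA n) = false := by
        rw [← Bool.not_eq_true]
        exact hc
      have hgnm : gA n ∉ PySem.Set.ofList (pre.map gA) := by
        rw [← hcmk]
        intro hmem
        exact hc ((PySem.Dict.contains_iff_mem_keys cm (gA n)).mpr hmem)
      obtain ⟨extra, hsplit⟩ := dedup_split pre t n hgnm
      have hsz : (cm.size : Int) = ((PySem.Set.ofList (SL.map gA)).idxOf (gA n) : Int) := by
        have h1 : cm.size = cm.keys.length := by
          simp only [PySem.Dict.keys, List.length_map]
          rfl
        rw [hSL, hsplit, idxOf_append_not_mem _ _ _ hgnm]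
        rw [h1, hcmk]
      have hval : (cm.insert (gA n) (cm.size : Int)).getD (gA n) 0 =
          ((PySem.Set.ofList (SL.map gA)).idxOf (gA n) : Int) := by
        rw [PySem.Dict.getD_insert_self, hsz]
      have hstep : aStep K.length (parent, cm, res) n = ((pvFind K.length parent n).1,
          cm.insert (gA n) (cm.size : Int),
          res.insert n ((PySem.Set.ofList (SL.map gA)).idxOf (gA n) : Int)) := by
        simp only [aStep, hfr2, hcf, if_false, hval, Bool.false_eq_true]
      rw [hstep]
      refine ih (pre ++ [n]) (pvFind K.length parent n).1 _ _ hSL' hReach' hK2 ?_ ?_ ?_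
      · rw [PySem.Dict.keys_insert_of_not_contains cm _ hcf, hcmk, List.map_append,
          PySem.Set.ofList_append, List.map_singleton, PySem.Set.update_cons,
          PySem.Set.add_of_not_mem hgnm]
        rfl
      · intro v hv
        rw [PySem.Dict.keys_insert_of_not_contains cm _ hcf] at hv
        rcases List.mem_append.mp hv with hv1 | hv1
        · have hvne : v ≠ gA n := by
            intro hh
            subst hh
            exact hgnm (hcmk ▸ hv1)
          rw [PySem.Dict.get?_insert_of_ne cm _ hvne, hcmg v hv1]
        · simp only [List.mem_singleton] at hv1
          subst hv1
          rw [PySem.Dict.get?_insert_self, hsz]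
      · rw [PySem.Dict.items_insert_of_not_contains res _ hresnc, hres, List.map_append,
          List.map_singleton]

lemma B_loop {K : List Int} (hnd : K.Nodup) {g : PySem.Dict Int (List Int)}
    {E : List (Int × Int)}
    (hadj : ∀ u v, Adj g u v ↔ pvRel E u v)
    (hgK : ∀ u v, v ∈ g.getD u [] → v ∈ K)
    (gA : Int → Int) (hconn : ∀ z w, Conn E z w ↔ gA z = gA w)
    (SL : List Int) (hSLK : ∀ x ∈ SL, x ∈ K) :
    ∀ (sl pre : List Int) (cid : PySem.Dict Int Int) (nid : Int),
      SL = pre ++ sl →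
      (∀ x, cid.get? x = if x ∈ K ∧ gA x ∈ pre.map gA
        then some (((PySem.Set.ofList (SL.map gA)).idxOf (gA x) : Int)) else none) →
      nid = ((PySem.Set.ofList (pre.map gA)).length : Int) →
      ∀ x, (sl.foldl (bStep g (K.length + 1)) (cid, nid)).1.get? x =
        (if x ∈ K ∧ gA x ∈ SL.map gA
         then some (((PySem.Set.ofList (SL.map gA)).idxOf (gA x) : Int)) else none) := by
  intro sl
  induction sl with
  | nil =>
    intro pre cid nid hSL hcid _ x
    rw [List.foldl_nil, hcid x, hSL, List.append_nil]
  | cons s t ih =>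
    intro pre cid nid hSL hcid hnid x
    have hsK : s ∈ K := hSLK s (by rw [hSL]; exact List.mem_append_right _ List.mem_cons_self)
    rw [List.foldl_cons]
    by_cases hmem : gA s ∈ pre.map gA
    · -- component already labelled: bStep skips
      have hcont : cid.contains s = true := by
        rw [PySem.Dict.contains_eq_isSome_get?, hcid s, if_pos ⟨hsK, hmem⟩]
        rfl
      have hstep : bStep g (K.length + 1) (cid, nid) s = (cid, nid) := by
        simp only [bStep, hcont, if_true]
      rw [hstep]
      refine ih (pre ++ [s]) cid nid (by rw [hSL]; simp) ?_ ?_ x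
      · intro y
        rw [hcid y]
        by_cases hy : y ∈ K ∧ gA y ∈ pre.map gA
        · rw [if_pos hy, if_pos ⟨hy.1, by rw [List.map_append]; exact List.mem_append_left _ hy.2⟩]
        · rw [if_neg hy, if_neg ?_]
          intro ⟨hy1, hy2⟩
          rw [List.map_append] at hy2
          rcases List.mem_append.mp hy2 with h2 | h2
          · exact hy ⟨hy1, h2⟩
          · simp only [List.map_singleton, List.mem_singleton] at h2
            exact hy ⟨hy1, h2 ▸ hmem⟩
      · rw [hnid, List.map_append, List.map_singleton, PySem.Set.ofList_append,
          PySem.Set.update_cons, PySem.Set.add_of_mem (by rwa [PySem.Set.mem_ofList]),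
          PySem.Set.update_nil]
    · -- new component
      have hcont : cid.contains s = false := by
        rw [PySem.Dict.contains_eq_isSome_get?, hcid s,
          if_neg (fun h => hmem h.2)]
        rfl
      have hnmem' : gA s ∉ PySem.Set.ofList (pre.map gA) := by
        rw [PySem.Set.mem_ofList]; exact hmem
      have hsingle : PySem.Set.add PySem.Set.empty s = [s] :=
        PySem.Set.add_of_not_mem (List.not_mem_nil)
      have hcomp := growLoop_spec hgK hnd s (K.length + 1) (PySem.Set.add PySem.Set.empty s)
        (by rw [hsingle]; exact List.nodup_singleton s)
        (by rw [hsingle]; intro y hy; rw [List.mem_singleton] at hy; exact hy ▸ hsK)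
        (by rw [hsingle]; intro y hy; rw [List.mem_singleton] at hy; exact hy ▸ Relation.ReflTransGen.refl)
        (by rw [hsingle]; exact List.mem_singleton_self s)
        (by rw [hsingle]; simp)
      have hrtgK : ∀ y, Relation.ReflTransGen (Adj g) s y → y ∈ K := by
        intro y hy
        induction hy with
        | refl => exact hsK
        | tail _ hbc ihh => exact hgK _ _ hbc
      have hcompiff : ∀ y, y ∈ pvGrowLoop g (K.length + 1) (PySem.Set.add PySem.Set.empty s) ↔
          (y ∈ K ∧ gA y = gA s) := by
        intro y
        rw [hcomp y]
        constructor
        · intro h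
          refine ⟨hrtgK y h, ?_⟩
          exact ((hconn s y).mp ((rtg_iff_conn hadj s y).mp h)).symm
        · rintro ⟨h1, h2⟩
          exact (rtg_iff_conn hadj s y).mpr ((hconn s y).mpr h2.symm)
      obtain ⟨extra, hsplit⟩ := dedup_split pre t s hnmem'
      have hidx : ((PySem.Set.ofList (SL.map gA)).idxOf (gA s)) =
          (PySem.Set.ofList (pre.map gA)).length := by
        rw [hSL, hsplit, idxOf_append_not_mem _ _ _ hnmem']
      have hstep : bStep g (K.length + 1) (cid, nid) s =
          ((pvGrowLoop g (K.length + 1) (PySem.Set.add PySem.Set.empty s)).foldl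
            (fun cid v => cid.insert v nid) cid, nid + 1) := by
        simp only [bStep, hcont, if_false, Bool.false_eq_true]
      rw [hstep]
      refine ih (pre ++ [s]) _ _ (by rw [hSL]; simp) ?_ ?_ x
      · intro y
        rw [foldl_insert_const_get?]
        by_cases hy : y ∈ pvGrowLoop g (K.length + 1) (PySem.Set.add PySem.Set.empty s)
        · obtain ⟨hy1, hy2⟩ := (hcompiff y).mp hy
          rw [if_pos hy, if_pos ⟨hy1, by
            rw [List.map_append, List.map_singleton]
            exact List.mem_append_right _ (by rw [List.mem_singleton, hy2])⟩]
          rw [hy2, hidx, hnid]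
        · rw [if_neg hy, hcid y]
          by_cases hy2 : y ∈ K ∧ gA y ∈ pre.map gA
          · rw [if_pos hy2, if_pos ⟨hy2.1,
              by rw [List.map_append]; exact List.mem_append_left _ hy2.2⟩]
          · rw [if_neg hy2, if_neg ?_]
            intro ⟨h1, h2⟩
            rw [List.map_append] at h2
            rcases List.mem_append.mp h2 with h3 | h3
            · exact hy2 ⟨h1, h3⟩
            · simp only [List.map_singleton, List.mem_singleton] at h3
              exact hy ((hcompiff y).mpr ⟨h1, h3⟩)
      · rw [hnid, List.map_append, List.map_singleton, PySem.Set.ofList_append,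
          PySem.Set.update_cons, PySem.Set.update_nil, PySem.Set.add_of_not_mem hnmem',
          List.length_append, List.length_singleton]
        push_cast
        ring

lemma python_components_eq (adj : List (Int × List (Int × Int)))
    (hPre : Pre_python_components adj) :
    python_components adj = python_components_alt adj := by
  have hnd : (PySem.Dict.ofList adj).keys.Nodup := PySem.Dict.nodup_keys_ofList adj
  simp only [python_components, python_components_alt]
  set d := PySem.Dict.ofList adj with hd
  set K := d.keys with hK
  set E := d.items.flatMap (fun p => p.2.map (fun q => (p.1, q.1))) with hE
  set SL := PySem.List.sorted K (fun x => x) false with hSLdef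
  have hSLnd : SL.Nodup := ((PySem.List.sorted_perm K (fun x => x) false).nodup_iff).mpr hnd
  have hSLK : ∀ x ∈ SL, x ∈ K :=
    fun x hx => (PySem.List.sorted_perm K (fun x => x) false).mem_iff.mp hx
  have hE_K : ∀ e ∈ E, e.1 ∈ K ∧ e.2 ∈ K := by
    intro e he
    obtain ⟨p, hp, hq⟩ := List.mem_flatMap.mp he
    obtain ⟨q, hq2, rfl⟩ := List.mem_map.mp hq
    exact ⟨PySem.Dict.mem_keys_of_mem_items d hp, hPre p hp q hq2⟩
  -- A side: the union loop establishes the invariant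
  set parent0 := K.foldl (fun (p : PySem.Dict Int Int) n => p.insert n n) PySem.Dict.empty
    with hparent0
  set rank0 := K.foldl (fun (p : PySem.Dict Int Int) n => p.insert n 0) PySem.Dict.empty
    with hrank0
  set stA := K.foldl (fun st n =>
      (d.getD n []).foldl (fun st q => pvUnion K.length st n q.1) st) (parent0, rank0) with hstA
  have hAfold : stA = d.items.foldl
      (fun st p => p.2.foldl (fun st q => pvUnion K.length st p.1 q.1) st) (parent0, rank0) := by
    rw [hstA]
    conv_lhs => rw [hK, PySem.Dict.keys, List.foldl_map]
    refine PySem.List.foldl_congr_mem _ _ _ _ ?_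
    intro st p hp
    rw [PySem.Dict.getD_of_mem_items d (show (p.1, p.2) ∈ d.items from Prod.mk.eta ▸ hp) hnd]
    rfl
  have hUF : UFInv K E stA.1 := by
    rw [hAfold]
    have h0 : UFInv K [] (parent0, rank0).1 := UFInv_init K
    have h1 := foldl_union_outer hnd d.items (parent0, rank0) []
      (fun p hp => ⟨PySem.Dict.mem_keys_of_mem_items d hp, fun q hq => hPre p hp q hq⟩) h0
    simpa using h1
  obtain ⟨hAf, hKf, hSame⟩ := hUF
  have hgA : ∀ z, Reaches (pfun stA.1) z (rootFun (pfun stA.1) hAf z) :=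
    rootFun_reaches (pfun stA.1) hAf
  set gA := rootFun (pfun stA.1) hAf with hgAdef
  have hA_items := A_norm_loop hnd (pfun stA.1) gA hgA SL hSLnd SL [] stA.1
    PySem.Dict.empty PySem.Dict.empty (List.nil_append SL).symm (fun z w => Iff.rfl) hKf
    (by simp [PySem.Dict.keys_empty])
    (fun v hv => by rw [PySem.Dict.keys_empty] at hv; exact absurd hv (List.not_mem_nil))
    rfl
  rw [hA_items]
  -- B side
  set g0 := K.foldl (fun (g : PySem.Dict Int (List Int)) n => g.insert n []) PySem.Dict.empty
    with hg0def
  set gG := d.items.foldl (fun g p =>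
      p.2.foldl (fun g q =>
        (g.modify p.1 [] (· ++ [q.1])).modify q.1 [] (· ++ [p.1])) g) g0 with hgGdef
  have hg0 : ∀ u, g0.getD u [] = [] :=
    getD_foldl_insert_nil K PySem.Dict.empty (fun u => PySem.Dict.getD_empty u [])
  have hadj : ∀ u v, Adj gG u v ↔ pvRel E u v := by
    intro u v
    have h1 := gfold_outer d.items g0 []
      (fun u v => by simp [hg0 u, pvRel]) u v
    rw [hgGdef]
    simpa [Adj] using h1
  have hgK : ∀ u v, v ∈ gG.getD u [] → v ∈ K := by
    intro u v hv
    rcases (hadj u v).mp hv with h3 | h3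
    · exact (hE_K _ h3).2
    · exact (hE_K _ h3).1
  have hconn : ∀ z w, Conn E z w ↔ gA z = gA w :=
    fun z w => (hSame z w).symm.trans (sameRoot_iff_gA hgA z w)
  have hB := B_loop hnd hadj hgK gA hconn SL hSLK SL [] PySem.Dict.empty 0
    (List.nil_append SL).symm
    (fun x => by
      rw [PySem.Dict.get?_empty]
      rw [if_neg (fun h => absurd h.2 (List.not_mem_nil))])
    (by simp)
  refine (List.map_congr_left ?_).symm
  intro n hn
  have hcond : n ∈ K ∧ gA n ∈ SL.map gA := ⟨hSLK n hn, List.mem_map_of_mem hn⟩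
  rw [PySem.Dict.getD_eq_get?_getD, hB n, if_pos hcond]
  rfl

-- ===== VERDICT (by name: the statement is the Claim_ definition above) =====
theorem python_components_spec : Claim_equal_python_components := by
  intro adj _ hPre
  unfold Spec_python_components
  exact python_components_eq adj hPre
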